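-- pv_equiv track=rewrite | github.com/onera/Cassiopee | Cassiopee/Converter/Converter/Distributed.py | mergeGraph
-- ===== SOURCE A (Python) =====
-- def mergeGraph(graph1, graph2):
--     import copy
--     graph = copy.deepcopy(graph1)
--     for proc in graph2.keys():
--         if proc in graph.keys():
--             for popp in graph2[proc]:
--                 if popp in graph[proc]:
--                     for zname in graph2[proc][popp]:
--                         if zname not in graph[proc][popp]:  graph[proc][popp].append(zname)
--                 else:
--                     graph[proc][popp] =  graph2[proc][popp]
--         else:
--             graph[proc] =  graph2[proc]
--
--     return graph
-- ===== SOURCE B (Python) =====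
-- def mergeGraph(graph1, graph2):
--     # Reduce-by-key over the concatenated item streams: no membership tests
--     # against "the other dict", just one generic collapse applied at both levels.
--     def union(xs, ys):
--         out = list(xs)
--         seen = set(out)
--         for z in ys:
--             if z not in seen:
--                 seen.add(z)
--                 out.append(z)
--         return out
--
--     def collapse(pairs, combine):
--         out = {}
--         for k, v in pairs:
--             out[k] = combine(out[k], v) if k in out else v
--         return out
--
--     return collapse(
--         list(graph1.items()) + list(graph2.items()),
--         lambda a, b: collapse(list(a.items()) + list(b.items()), union))
-- ===== Notes on version B (the rewrite author's own statement) =====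
-- stated objective: alternative
-- what changed: Replaces A's deepcopy-then-patch triple nested loops over graph2 with a generic reduce-by-key (dict-of-accumulators) pass over the CONCATENATED item streams of both graphs, applied at both nesting levels, with a seen-set ordered union at the leaves.
import Mathlib
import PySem

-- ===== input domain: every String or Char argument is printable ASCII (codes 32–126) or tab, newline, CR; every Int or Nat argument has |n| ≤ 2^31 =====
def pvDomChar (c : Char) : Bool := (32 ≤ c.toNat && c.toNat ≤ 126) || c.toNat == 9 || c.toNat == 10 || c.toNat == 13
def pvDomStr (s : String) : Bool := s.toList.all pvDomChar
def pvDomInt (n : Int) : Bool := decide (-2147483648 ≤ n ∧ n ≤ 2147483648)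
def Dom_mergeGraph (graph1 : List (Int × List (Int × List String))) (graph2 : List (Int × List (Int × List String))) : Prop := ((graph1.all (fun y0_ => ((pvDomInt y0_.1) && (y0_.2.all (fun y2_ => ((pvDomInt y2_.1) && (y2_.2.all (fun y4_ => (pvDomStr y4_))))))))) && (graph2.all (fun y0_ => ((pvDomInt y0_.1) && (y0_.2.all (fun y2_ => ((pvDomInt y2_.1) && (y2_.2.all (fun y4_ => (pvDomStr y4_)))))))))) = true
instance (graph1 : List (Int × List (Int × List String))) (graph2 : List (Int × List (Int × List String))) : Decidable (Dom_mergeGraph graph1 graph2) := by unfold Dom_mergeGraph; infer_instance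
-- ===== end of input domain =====

-- B replaces A's deepcopy-then-patch nested loops over graph2 with a generic reduce-by-key over the
-- CONCATENATED item streams (one dict-of-accumulators collapse, applied at both levels, seen-set union at
-- the leaves); objective: alternative. Return-value equivalence only (neither version mutates its arguments).

-- ===== PORT A =====
-- leaf loop: 'for zname in graph2[proc][popp]: if zname not in graph[proc][popp]: append'
def aLeaf (zs1 zs2 : List String) : List String :=
  zs2.foldl (fun acc z => if acc.contains z then acc else acc ++ [z]) zs1

-- middle loop: 'for popp in graph2[proc]: …' updating graph[proc] in place
def aInner (inner1 inner2 : List (Int × List String)) : List (Int × List String) :=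
  inner2.foldl (fun acc pp =>
    if acc.any (fun q => q.1 == pp.1) then
      acc.map (fun q => if q.1 == pp.1 then (q.1, aLeaf q.2 pp.2) else q)
    else acc ++ [pp]) inner1

def mergeGraph (graph1 : List (Int × List (Int × List String))) (graph2 : List (Int × List (Int × List String))) : List (Int × List (Int × List String)) :=
  graph2.foldl (fun acc pr =>
    if acc.any (fun q => q.1 == pr.1) then
      acc.map (fun q => if q.1 == pr.1 then (q.1, aInner q.2 pr.2) else q)
    else acc ++ [pr]) graph1

-- ===== PORT B =====
-- B's 'union(xs, ys)': copy xs, then append each unseen element of ys, tracking a seen set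
def bUnion (xs ys : List String) : List String :=
  (ys.foldl (fun (st : PySem.Set String × List String) z =>
      if PySem.Set.contains st.1 z then st
      else (PySem.Set.add st.1 z, st.2 ++ [z]))
    (PySem.Set.ofList xs, xs)).2

-- Python 'out[k] = v' on a dict (assoc list with unique keys): overwrite in place, new key appends
def dput {α : Type} (d : List (Int × α)) (k : Int) (v : α) : List (Int × α) :=
  match d with
  | [] => [(k, v)]
  | p :: rest => if p.1 == k then (k, v) :: rest else p :: dput rest k v

-- Python 'out[k]' / 'k in out'
def dget? {α : Type} (d : List (Int × α)) (k : Int) : Option α :=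
  (d.find? (fun p => p.1 == k)).map (·.2)

-- one iteration of B's 'for k, v in pairs' loop body
def cstep {α : Type} (combine : α → α → α) (out : List (Int × α)) (p : Int × α) : List (Int × α) :=
  match dget? out p.1 with
  | some w => dput out p.1 (combine w p.2)
  | none => dput out p.1 p.2

-- B's 'collapse(pairs, combine)'
def collapse {α : Type} (combine : α → α → α) (pairs : List (Int × α)) : List (Int × α) :=
  pairs.foldl (cstep combine) []

def mergeGraph_alt (graph1 : List (Int × List (Int × List String))) (graph2 : List (Int × List (Int × List String))) : List (Int × List (Int × List String)) :=
  collapse (fun a b => collapse bUnion (a ++ b)) (graph1 ++ graph2)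

-- ===== PRECONDITION & SPEC =====
-- The assoc lists encode Python dicts, whose keys are unique: Pre_ excludes lists with a duplicated key at
-- either dict level, which do not represent any input A's Python (taking dicts) can receive.
def Pre_mergeGraph (graph1 : List (Int × List (Int × List String))) (graph2 : List (Int × List (Int × List String))) : Prop :=
  (graph1.map Prod.fst).Nodup ∧ (∀ p ∈ graph1, (p.2.map Prod.fst).Nodup) ∧
  (graph2.map Prod.fst).Nodup ∧ (∀ p ∈ graph2, (p.2.map Prod.fst).Nodup)
instance (graph1 : List (Int × List (Int × List String))) (graph2 : List (Int × List (Int × List String))) : Decidable (Pre_mergeGraph graph1 graph2) := by unfold Pre_mergeGraph; infer_instance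

def pvWitness_mergeGraph : (List (Int × List (Int × List String))) × (List (Int × List (Int × List String))) :=
  ([(1, [(2, ["a", "b"])]), (3, [])], [(1, [(2, ["c", "a"]), (4, ["d"])]), (5, [(1, ["e"])])])

def Spec_mergeGraph (graph1 : List (Int × List (Int × List String))) (graph2 : List (Int × List (Int × List String))) (out : List (Int × List (Int × List String))) : Prop := out = mergeGraph_alt graph1 graph2
instance (graph1 : List (Int × List (Int × List String))) (graph2 : List (Int × List (Int × List String))) (out : List (Int × List (Int × List String))) : Decidable (Spec_mergeGraph graph1 graph2 out) := by unfold Spec_mergeGraph; infer_instance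

-- ===== CLAIM (what is proved, stated in full; the proofs are below) =====
def Claim_equal_mergeGraph : Prop := ∀ (graph1 : List (Int × List (Int × List String))) (graph2 : List (Int × List (Int × List String))), Dom_mergeGraph graph1 graph2 → Pre_mergeGraph graph1 graph2 → Spec_mergeGraph graph1 graph2 (mergeGraph graph1 graph2)

-- ===== LEMMAS AND PROOFS =====

-- the shape of A's loop body at both levels
def astep {α : Type} (f : α → α → α) (acc : List (Int × α)) (pr : Int × α) : List (Int × α) :=
  if acc.any (fun q => q.1 == pr.1) then
    acc.map (fun q => if q.1 == pr.1 then (q.1, f q.2 pr.2) else q)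
  else acc ++ [pr]

theorem aInner_eq_foldl (a b : List (Int × List String)) : aInner a b = b.foldl (astep aLeaf) a := rfl
theorem mergeGraph_eq_foldl (g1 g2 : List (Int × List (Int × List String))) :
    mergeGraph g1 g2 = g2.foldl (astep aInner) g1 := rfl

theorem any_key_iff {α : Type} (d : List (Int × α)) (k : Int) :
    d.any (fun q => q.1 == k) = true ↔ k ∈ d.map Prod.fst := by
  rw [List.any_eq_true]
  constructor
  · rintro ⟨q, hq, hb⟩
    exact List.mem_map.mpr ⟨q, hq, by simpa using hb⟩
  · intro h
    rcases List.mem_map.mp h with ⟨q, hq, rfl⟩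
    exact ⟨q, hq, by simp⟩

theorem dget?_eq_none_iff {α : Type} (d : List (Int × α)) (k : Int) :
    dget? d k = none ↔ k ∉ d.map Prod.fst := by
  simp only [dget?, Option.map_eq_none_iff, List.find?_eq_none]
  constructor
  · intro h hk
    rcases List.mem_map.mp hk with ⟨p, hp, rfl⟩
    exact (by simpa using h p hp)
  · intro h p hp hbeq
    exact h (List.mem_map.mpr ⟨p, hp, by simpa using hbeq⟩)

theorem dput_of_not_mem {α : Type} (d : List (Int × α)) (k : Int) (v : α)
    (h : k ∉ d.map Prod.fst) : dput d k v = d ++ [(k, v)] := by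
  induction d with
  | nil => rfl
  | cons p rest ih =>
    simp only [List.map_cons, List.mem_cons, not_or] at h
    have hne : (p.1 == k) = false := by
      simp only [beq_eq_false_iff_ne]
      exact fun hp => h.1 hp.symm
    simp [dput, hne, ih h.2]

theorem dget?_unique {α : Type} (d : List (Int × α)) (k : Int) (w : α)
    (hnd : (d.map Prod.fst).Nodup) (h : dget? d k = some w) :
    ∀ q ∈ d, q.1 = k → q = (k, w) := by
  induction d with
  | nil => simp
  | cons p rest ih =>
    simp only [List.map_cons, List.nodup_cons] at hnd
    intro q hq hqk
    rcases List.mem_cons.mp hq with rfl | hq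
    · -- q is the head; it matches, so find? returns it
      have hfind : dget? (q :: rest) k = some q.2 := by
        simp [dget?, hqk]
      rw [h] at hfind
      exact Prod.ext hqk (Option.some.inj hfind).symm
    · -- q in the tail: head cannot match (nodup), so find? looks in the tail
      have hpk : (p.1 == k) = false := by
        simp only [beq_eq_false_iff_ne]
        intro hp
        exact hnd.1 (hp ▸ (hqk ▸ List.mem_map.mpr ⟨q, hq, rfl⟩))
      have hrec : dget? rest k = some w := by
        simpa [dget?, List.find?_cons, hpk] using h
      exact ih hnd.2 hrec q hq hqk

theorem dput_eq_map {α : Type} (d : List (Int × α)) (k : Int) (v : α)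
    (hnd : (d.map Prod.fst).Nodup) (hmem : k ∈ d.map Prod.fst) :
    dput d k v = d.map (fun q => if q.1 == k then (k, v) else q) := by
  induction d with
  | nil => simp at hmem
  | cons p rest ih =>
    simp only [List.map_cons, List.nodup_cons] at hnd
    by_cases hpk : p.1 = k
    · have hrest : ∀ q ∈ rest, ¬ q.1 = k := by
        intro q hq hb
        exact hnd.1 (hpk ▸ hb ▸ List.mem_map.mpr ⟨q, hq, rfl⟩)
      have hmap : rest.map (fun q => if q.1 = k then (k, v) else q) = rest := by
        rw [show rest.map (fun q => if q.1 = k then (k, v) else q) = rest.map id from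
          List.map_congr_left (fun q hq => by simp [hrest q hq]), List.map_id]
      simp [dput, hpk, hmap]
    · have hmem' : k ∈ rest.map Prod.fst := by
        rcases List.mem_cons.mp hmem with h | h
        · exact absurd h.symm hpk
        · exact h
      simp [dput, (by simpa using hpk : (p.1 == k) = false), ih hnd.2 hmem', hpk]

-- keys are preserved by astep's map branch
theorem keys_map_update {α : Type} (d : List (Int × α)) (k : Int) (g : (Int × α) → α) :
    (d.map (fun q => if q.1 == k then (q.1, g q) else q)).map Prod.fst = d.map Prod.fst := by
  rw [List.map_map]; apply List.map_congr_left
  intro q _; by_cases h : q.1 = k <;> simp [h]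

-- one B-step equals one A-step on an accumulator with unique keys (and keys stay unique)
theorem foldl_cstep_eq_foldl_astep {α : Type} (f : α → α → α) (d2 d1 : List (Int × α))
    (hnd : (d1.map Prod.fst).Nodup) :
    d2.foldl (cstep f) d1 = d2.foldl (astep f) d1 := by
  induction d2 generalizing d1 with
  | nil => rfl
  | cons pr d2 ih =>
    simp only [List.foldl_cons]
    by_cases hmem : pr.1 ∈ d1.map Prod.fst
    · -- present: B overwrites in place, A maps over all entries; nodup makes them equal
      obtain ⟨w, hw⟩ : ∃ w, dget? d1 pr.1 = some w := by
        cases h : dget? d1 pr.1 with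
        | none => exact absurd hmem ((dget?_eq_none_iff d1 pr.1).mp h)
        | some w => exact ⟨w, rfl⟩
      have hstep : cstep f d1 pr = astep f d1 pr := by
        simp only [cstep, hw]
        unfold astep
        rw [if_pos ((any_key_iff d1 pr.1).mpr hmem)]
        rw [dput_eq_map d1 pr.1 (f w pr.2) hnd hmem]
        apply List.map_congr_left
        intro q hq
        by_cases h : q.1 = pr.1
        · have := dget?_unique d1 pr.1 w hnd hw q hq h
          simp [this]
        · simp [h]
      rw [hstep]
      apply ih
      unfold astep
      rw [if_pos ((any_key_iff d1 pr.1).mpr hmem), keys_map_update]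
      exact hnd
    · -- absent: both append
      have hnone : dget? d1 pr.1 = none := (dget?_eq_none_iff d1 pr.1).mpr hmem
      have hstep : cstep f d1 pr = d1 ++ [pr] := by
        simp only [cstep, hnone]
        exact dput_of_not_mem d1 pr.1 pr.2 hmem
      have hstep' : astep f d1 pr = d1 ++ [pr] := by
        unfold astep
        rw [if_neg (by rw [any_key_iff]; exact hmem)]
      rw [hstep, hstep']
      apply ih
      simp only [List.map_append, List.map_cons, List.map_nil]
      simp [List.nodup_append, hnd]
      intro a x hax heq
      exact hmem (heq ▸ List.mem_map.mpr ⟨(a, x), hax, rfl⟩)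

-- collapsing a key-unique prefix just replays it
theorem foldl_cstep_id {α : Type} (f : α → α → α) (d acc : List (Int × α))
    (hnd : ((acc ++ d).map Prod.fst).Nodup) :
    d.foldl (cstep f) acc = acc ++ d := by
  induction d generalizing acc with
  | nil => simp
  | cons p d ih =>
    have hfresh : p.1 ∉ acc.map Prod.fst := by
      intro h
      rw [List.map_append, List.nodup_append] at hnd
      exact hnd.2.2 p.1 h p.1 (by simp) rfl
    have hnone : dget? acc p.1 = none := (dget?_eq_none_iff acc p.1).mpr hfresh
    have hstep : cstep f acc p = acc ++ [p] := by
      simp only [cstep, hnone]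
      exact dput_of_not_mem acc p.1 p.2 hfresh
    rw [List.foldl_cons, hstep, ih (acc ++ [p]) (by simpa using hnd), List.append_assoc]
    rfl

-- B's seen-set union computes A's membership-append loop
theorem bUnion_eq_aLeaf : bUnion = aLeaf := by
  funext xs ys
  suffices h : ∀ (ys : List String) (s : PySem.Set String) (out : List String),
      (∀ z, z ∈ s ↔ z ∈ out) →
      (ys.foldl (fun (st : PySem.Set String × List String) z =>
        if PySem.Set.contains st.1 z then st
        else (PySem.Set.add st.1 z, st.2 ++ [z])) (s, out)).2
      = ys.foldl (fun acc z => if acc.contains z then acc else acc ++ [z]) out by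
    exact h ys (PySem.Set.ofList xs) xs (fun z => PySem.Set.mem_ofList xs z)
  intro ys
  induction ys with
  | nil => intro s out _; rfl
  | cons z ys ih =>
    intro s out hinv
    simp only [List.foldl_cons]
    by_cases hz : z ∈ out
    · have h1 : PySem.Set.contains s z = true := by
        rw [PySem.Set.contains_iff]
        exact (hinv z).mpr hz
      have h2 : out.contains z = true := by simpa using hz
      rw [h1, h2]
      simp only [if_true]
      exact ih s out hinv
    · have h1 : PySem.Set.contains s z = false := by
        rw [← Bool.not_eq_true, PySem.Set.contains_iff]
        exact fun h => hz ((hinv z).mp h)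
      have h2 : out.contains z = false := by simpa using hz
      rw [h1, h2]
      simp only [Bool.false_eq_true, if_false]
      exact ih _ _ (fun y => by
        rw [PySem.Set.mem_add]
        simp [hinv y, or_comm])

-- collapse over a concatenation = collapse the first part, then continue the loop over the second
theorem collapse_append {α : Type} (f : α → α → α) (d1 d2 : List (Int × α)) :
    collapse f (d1 ++ d2) = d2.foldl (cstep f) (collapse f d1) := by
  simp only [collapse, List.foldl_append]

-- collapsing a key-unique list replays it unchanged
theorem collapse_id {α : Type} (f : α → α → α) (d : List (Int × α))
    (hnd : (d.map Prod.fst).Nodup) : collapse f d = d := by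
  unfold collapse
  rw [foldl_cstep_id f d [] (by simpa using hnd), List.nil_append]

-- the inner collapse equals A's inner loop when the graph1-side dict has unique keys
theorem collapse_inner_eq (a b : List (Int × List String))
    (hnd : (a.map Prod.fst).Nodup) :
    collapse bUnion (a ++ b) = aInner a b := by
  rw [collapse_append, collapse_id bUnion a hnd,
      foldl_cstep_eq_foldl_astep bUnion b a hnd, aInner_eq_foldl, bUnion_eq_aLeaf]

-- keys of an astep fold stay unique (used to keep inner values well-formed)
theorem nodup_keys_foldl_astep {α : Type} (f : α → α → α) (d2 d1 : List (Int × α))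
    (hnd : (d1.map Prod.fst).Nodup) :
    ((d2.foldl (astep f) d1).map Prod.fst).Nodup := by
  induction d2 generalizing d1 with
  | nil => exact hnd
  | cons pr d2 ih =>
    simp only [List.foldl_cons]
    apply ih
    unfold astep
    by_cases hmem : d1.any (fun q => q.1 == pr.1) = true
    · rw [if_pos hmem, keys_map_update]; exact hnd
    · rw [if_neg hmem]
      have hfr : pr.1 ∉ d1.map Prod.fst := fun h => hmem ((any_key_iff d1 pr.1).mpr h)
      simp only [List.map_append, List.map_cons, List.map_nil]
      simp [List.nodup_append, hnd]
      intro a x hax heq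
      exact hfr (heq ▸ List.mem_map.mpr ⟨(a, x), hax, rfl⟩)

theorem aInner_keys_nodup (a b : List (Int × List String)) (hnd : (a.map Prod.fst).Nodup) :
    ((aInner a b).map Prod.fst).Nodup := by
  rw [aInner_eq_foldl]; exact nodup_keys_foldl_astep aLeaf b a hnd

-- congruence of the top-level fold: aInner vs B's inner collapse, given well-formed values
theorem foldl_astep_congr (b acc : List (Int × List (Int × List String)))
    (hacc : ∀ p ∈ acc, (p.2.map Prod.fst).Nodup)
    (hb : ∀ p ∈ b, (p.2.map Prod.fst).Nodup) :
    b.foldl (astep aInner) acc = b.foldl (astep (fun a b => collapse bUnion (a ++ b))) acc := by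
  induction b generalizing acc with
  | nil => rfl
  | cons pr b ih =>
    simp only [List.foldl_cons]
    have hb' : ∀ p ∈ b, (p.2.map Prod.fst).Nodup := fun p hp => hb p (List.mem_cons_of_mem _ hp)
    by_cases hmem : acc.any (fun q => q.1 == pr.1) = true
    · have hstep : astep aInner acc pr = astep (fun a b => collapse bUnion (a ++ b)) acc pr := by
        unfold astep
        rw [if_pos hmem, if_pos hmem]
        apply List.map_congr_left
        intro q hq
        by_cases h : q.1 = pr.1
        · simp only [h, BEq.rfl, if_true]
          rw [collapse_inner_eq q.2 pr.2 (hacc q hq)]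
        · simp [h]
      rw [hstep]
      refine ih _ ?_ hb'
      intro p hp
      unfold astep at hp
      rw [if_pos hmem] at hp
      rcases List.mem_map.mp hp with ⟨q, hq, rfl⟩
      by_cases h : q.1 = pr.1
      · simp only [h, BEq.rfl, if_true]
        rw [collapse_inner_eq q.2 pr.2 (hacc q hq)]
        exact aInner_keys_nodup q.2 pr.2 (hacc q hq)
      · simp only [(by simpa using h : (q.1 == pr.1) = false), Bool.false_eq_true, if_false]
        exact hacc q hq
    · have hstep : ∀ g : List (Int × List String) → List (Int × List String) → List (Int × List String),
          astep g acc pr = acc ++ [pr] := by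
        intro g; unfold astep; rw [if_neg hmem]
      rw [hstep, hstep]
      refine ih _ ?_ hb'
      intro p hp
      rcases List.mem_append.mp hp with h | h
      · exact hacc p h
      · simp only [List.mem_singleton] at h
        exact h ▸ hb pr (by simp)

theorem mergeGraph_eq (graph1 graph2 : List (Int × List (Int × List String)))
    (hpre : Pre_mergeGraph graph1 graph2) :
    mergeGraph graph1 graph2 = mergeGraph_alt graph1 graph2 := by
  obtain ⟨h1top, h1in, _, h2in⟩ := hpre
  rw [mergeGraph_eq_foldl]
  unfold mergeGraph_alt
  rw [collapse_append, collapse_id _ graph1 h1top,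
      foldl_cstep_eq_foldl_astep _ graph2 graph1 h1top]
  exact foldl_astep_congr graph2 graph1 h1in h2in

-- ===== VERDICT (by name: the statement is the Claim_ definition above) =====
theorem mergeGraph_spec : Claim_equal_mergeGraph := by
  intro g1 g2 _ hpre
  unfold Spec_mergeGraph
  exact mergeGraph_eq g1 g2 hpre
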